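-- pv_equiv track=rewrite | github.com/sharathFL/video-qna-app | src/serve_video_inference_multiclass.py | _normalize_multiclass_pred
-- ===== SOURCE A (Python) =====
-- def _normalize_multiclass_pred(pred, valid_responses):
--     """Map raw model output to one of valid_responses."""
--     if not pred or not valid_responses:
--         return (pred[:32] if pred else "") or list(valid_responses)[0]
--     pred_clean = pred.strip()
--     if pred_clean in valid_responses:
--         return pred_clean
--     for c in sorted(valid_responses, key=len, reverse=True):
--         if c in pred:
--             return c
--     return pred_clean[:32] if pred_clean else list(valid_responses)[0]
-- ===== SOURCE B (Python) =====
-- def _normalize_multiclass_pred(pred, valid_responses):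
--     """Map raw model output to one of valid_responses."""
--     if not pred:
--         return valid_responses[0]
--     if not valid_responses:
--         return pred[:32]
--     pred_clean = pred.strip()
--     if pred_clean in valid_responses:
--         return pred_clean
--     best = None
--     for c in valid_responses:
--         if (best is None or len(best) < len(c)) and c in pred:
--             best = c
--     if best is not None:
--         return best
--     return pred_clean[:32] if pred_clean else valid_responses[0]
-- ===== Notes on version B (the rewrite author's own statement) =====
-- stated objective: alternative
-- what changed: Replaces A's sort-descending-by-length plus early-exit scan with a single left-to-right pass keeping the best (strictly longer) matching candidate in an accumulator, and splits the combined empty-input guard into two separate early returns; the strict '<' update reproduces A's first-longest tie-break without sorting.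
import Mathlib
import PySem

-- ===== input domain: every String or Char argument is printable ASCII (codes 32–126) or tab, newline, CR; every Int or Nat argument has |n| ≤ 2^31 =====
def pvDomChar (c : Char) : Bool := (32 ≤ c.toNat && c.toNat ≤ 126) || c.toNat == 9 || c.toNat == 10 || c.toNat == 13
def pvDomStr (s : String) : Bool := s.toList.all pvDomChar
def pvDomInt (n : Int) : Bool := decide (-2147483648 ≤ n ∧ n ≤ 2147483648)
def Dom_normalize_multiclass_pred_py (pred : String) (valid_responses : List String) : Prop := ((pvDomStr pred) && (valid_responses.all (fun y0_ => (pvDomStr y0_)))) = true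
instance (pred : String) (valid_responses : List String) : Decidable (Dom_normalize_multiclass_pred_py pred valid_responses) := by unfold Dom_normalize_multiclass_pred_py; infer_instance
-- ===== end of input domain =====

-- B replaces A's sort-descending-then-early-exit match loop by a single accumulator pass
-- keeping the first strictly-longest matching candidate (same tie-break), and splits the
-- combined empty-input guard into two early returns; same cost class, no sort.

-- ===== PORT A =====
def normalize_multiclass_pred_py (pred : String) (valid_responses : List String) : String :=
  if pred = "" || valid_responses.isEmpty then
    let r := if pred ≠ "" then PySem.Str.slice pred none (some 32) else ""
    if r ≠ "" then r else valid_responses.headD ""   -- list(valid_responses)[0]; the IndexError case is outside Pre_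
  else
    let pred_clean := PySem.Str.strip pred
    if valid_responses.contains pred_clean then pred_clean
    else
      match (PySem.List.sorted valid_responses (fun c => PySem.Str.len c) true).find? (fun c => PySem.Str.isIn c pred) with
      | some c => c
      | none =>
        if pred_clean ≠ "" then PySem.Str.slice pred_clean none (some 32)
        else valid_responses.headD ""   -- valid_responses nonempty in this branch

-- ===== PORT B =====
def normalize_multiclass_pred_py_alt (pred : String) (valid_responses : List String) : String :=
  if pred = "" then valid_responses.headD ""        -- valid_responses[0]; IndexError case outside Pre_
  else if valid_responses.isEmpty then PySem.Str.slice pred none (some 32)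
  else
    let pred_clean := PySem.Str.strip pred
    if valid_responses.contains pred_clean then pred_clean
    else
      -- one pass: keep the first strictly-longest candidate occurring in pred
      let best := valid_responses.foldl
        (fun b c =>
          if (b.elim true (fun m => decide (PySem.Str.len m < PySem.Str.len c))) &&
             PySem.Str.isIn c pred
          then some c else b) none
      match best with
      | some b => b
      | none =>
          if pred_clean ≠ "" then PySem.Str.slice pred_clean none (some 32)
          else valid_responses.headD ""

-- ===== PRECONDITION & SPEC =====
-- Pre_ excludes only pred = "" with valid_responses = [], where A raises IndexError on list(valid_responses)[0].
def Pre_normalize_multiclass_pred_py (pred : String) (valid_responses : List String) : Prop :=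
  ¬ (pred = "" ∧ valid_responses = [])
instance (pred : String) (valid_responses : List String) : Decidable (Pre_normalize_multiclass_pred_py pred valid_responses) := by unfold Pre_normalize_multiclass_pred_py; infer_instance
def pvWitness_normalize_multiclass_pred_py : String × List String := ("maybe yes", ["yes", "no"])
def Spec_normalize_multiclass_pred_py (pred : String) (valid_responses : List String) (out : String) : Prop := out = normalize_multiclass_pred_py_alt pred valid_responses
instance (pred : String) (valid_responses : List String) (out : String) : Decidable (Spec_normalize_multiclass_pred_py pred valid_responses out) := by unfold Spec_normalize_multiclass_pred_py; infer_instance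

-- ===== CLAIM (what is proved, stated in full; the proofs are below) =====
def Claim_equal_normalize_multiclass_pred_py : Prop := ∀ (pred : String) (valid_responses : List String), Dom_normalize_multiclass_pred_py pred valid_responses → Pre_normalize_multiclass_pred_py pred valid_responses → Spec_normalize_multiclass_pred_py pred valid_responses (normalize_multiclass_pred_py pred valid_responses)

-- ===== LEMMAS AND PROOFS =====

-- find? over a stable descending insertion: one insertBy step
lemma find?_insertBy_desc {α κ : Type} [LinearOrder κ] (key : α → κ) (p : α → Bool) (x : α)
    (acc : List α) (h : acc.Pairwise (fun a b => key b ≤ key a)) :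
    (PySem.List.insertBy (fun a b => decide (key b < key a)) x acc).find? p =
      match acc.find? p with
      | none => if p x then some x else none
      | some m => if p x && decide (key m < key x) then some x else some m := by
  induction acc with
  | nil => cases hpx : p x <;> simp [PySem.List.insertBy, List.find?, hpx]
  | cons y ys ih =>
    have hy : ∀ m ∈ ys, key m ≤ key y := (List.pairwise_cons.mp h).1
    have hys : ys.Pairwise (fun a b => key b ≤ key a) := (List.pairwise_cons.mp h).2
    simp only [PySem.List.insertBy]
    by_cases hlt : key y < key x
    · simp only [hlt, decide_true, if_true]
      cases hpx : p x with
      | true =>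
        rw [List.find?_cons_of_pos hpx]
        cases hfy : List.find? p (y :: ys) with
        | none => simp
        | some m =>
          have hm : m ∈ y :: ys := List.mem_of_find?_eq_some hfy
          have hle : key m ≤ key y := by
            rcases List.mem_cons.mp hm with h1 | h2
            · exact le_of_eq (by rw [h1])
            · exact hy m h2
          simp [lt_of_le_of_lt hle hlt]
      | false =>
        rw [List.find?_cons_of_neg (by simp [hpx])]
        cases hfy : List.find? p (y :: ys) <;> simp
    · simp only [hlt, decide_false, Bool.false_eq_true, if_false]
      cases hpy : p y with
      | true =>
        rw [List.find?_cons_of_pos hpy, List.find?_cons_of_pos hpy]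
        have : ¬ key y < key x := hlt
        simp [this]
      | false =>
        rw [List.find?_cons_of_neg (by simp [hpy]), List.find?_cons_of_neg (by simp [hpy])]
        exact ih hys

-- the max?-fold step on appending one element to the filtered list
lemma max?_append_one {α κ : Type} [LinearOrder κ] (key : α → κ) (p : α → Bool) (x : α)
    (xs : List α) :
    PySem.List.max? ((xs ++ [x]).filter p) key =
      match PySem.List.max? (xs.filter p) key with
      | none => if p x then some x else none
      | some m => if p x && decide (key m < key x) then some x else some m := by
  cases hpx : p x with
  | true =>
    have hf : (xs ++ [x]).filter p = xs.filter p ++ [x] := by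
      simp [List.filter_append, hpx]
    rw [hf]
    show List.foldl _ none (xs.filter p ++ [x]) = _
    rw [List.foldl_append]
    cases hm : PySem.List.max? (xs.filter p) key with
    | none => rw [show (List.foldl _ none (xs.filter p) : Option α) = none from hm]; simp
    | some m =>
      rw [show (List.foldl _ none (xs.filter p) : Option α) = some m from hm]
      by_cases hk : key m < key x <;> simp [hk]
  | false =>
    have hf : (xs ++ [x]).filter p = xs.filter p := by
      simp [List.filter_append, hpx]
    rw [hf]
    cases hm : PySem.List.max? (xs.filter p) key <;> simp

-- the core fact about A's loop: first match in the stable length-descending sort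
-- equals the first length-maximum of the matching candidates
lemma find?_sorted_rev_eq_max?_filter {α κ : Type} [LinearOrder κ] (key : α → κ) (p : α → Bool)
    (xs : List α) :
    (PySem.List.sorted xs key true).find? p = PySem.List.max? (xs.filter p) key := by
  induction xs using List.reverseRecOn with
  | nil => simp [PySem.List.sorted, PySem.List.max?]
  | append_singleton xs x ih =>
    have hstep : PySem.List.sorted (xs ++ [x]) key true =
        PySem.List.insertBy (fun a b => decide (key b < key a)) x (PySem.List.sorted xs key true) := by
      simp [PySem.List.sorted, List.foldl_append]
    rw [hstep, find?_insertBy_desc key p x _ (PySem.List.sorted_pairwise_rev xs key),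
      ih, max?_append_one]

-- B's one-pass accumulator loop computes exactly max? of the filtered candidates
lemma foldl_best_eq_max?_filter {α κ : Type} [LinearOrder κ] (key : α → κ) (p : α → Bool)
    (xs : List α) : ∀ acc : Option α,
    xs.foldl (fun b c => if (b.elim true (fun m => decide (key m < key c))) && p c then some c else b) acc
      = (xs.filter p).foldl
          (fun m x => match m with
            | none => some x
            | some m => if key m < key x then some x else some m) acc := by
  induction xs with
  | nil => intro acc; simp
  | cons c t ih =>
    intro acc
    cases hpc : p c with
    | false =>
      rw [List.filter_cons_of_neg (by simp [hpc])]
      simp only [List.foldl_cons, hpc, Bool.and_false, Bool.false_eq_true, if_false]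
      exact ih acc
    | true =>
      rw [List.filter_cons_of_pos hpc]
      simp only [List.foldl_cons, hpc, Bool.and_true]
      cases acc with
      | none => simpa using ih (some c)
      | some m =>
        by_cases hk : key m < key c
        · simp only [hk, decide_true, Option.elim, if_true]; exact ih (some c)
        · simp only [hk, decide_false, Option.elim, Bool.false_eq_true, if_false]
          exact ih (some m)

-- ===== VERDICT (by name: the statement is the Claim_ definition above) =====
theorem normalize_multiclass_pred_py_spec : Claim_equal_normalize_multiclass_pred_py := by
  intro pred valid_responses _ _
  unfold Spec_normalize_multiclass_pred_py normalize_multiclass_pred_py normalize_multiclass_pred_py_alt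
  by_cases hp : pred = ""
  · -- A's combined guard fires with r = ""
    simp [hp]
  · rw [if_neg hp]
    by_cases hv : valid_responses.isEmpty
    · -- A's combined guard fires with r = slice pred; headD of [] is ""
      have hnil : valid_responses = [] := List.isEmpty_iff.mp hv
      rw [if_pos (by simp [hp, hv])]
      simp only [hp, ne_eq, not_false_eq_true, if_true, hnil, List.headD_nil]
      by_cases hr : PySem.Str.slice pred none (some 32) = "" <;> simp [hr]
    · rw [if_neg (by simp [hp, hv]), if_neg hv]
      by_cases h2 : valid_responses.contains (PySem.Str.strip pred) = true
      · rw [if_pos h2, if_pos h2]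
      · rw [if_neg h2, if_neg h2]
        rw [find?_sorted_rev_eq_max?_filter, foldl_best_eq_max?_filter]
        rfl
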